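-- pv_equiv track=rewrite | github.com/superbuzzy/vibe_demo | itil/app.py | smart_join
-- ===== SOURCE A (Python) =====
-- from typing import Any, Iterable
--
-- def smart_join(parts: Iterable[str]) -> str:
--     result = ""
--     for part in parts:
--         fragment = part.strip()
--         if not fragment:
--             continue
--         if (
--             result
--             and result[-1].isascii()
--             and fragment[0].isascii()
--             and result[-1].isalnum()
--             and fragment[0].isalnum()
--         ):
--             result += " "
--         result += fragment
--     return result
-- ===== SOURCE B (Python) =====
-- def smart_join(parts):
--     frags = [p.strip() for p in parts]
--     return _join(frags, 0, len(frags))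
--
--
-- def _join(frags, lo, hi):
--     if hi - lo == 0:
--         return ""
--     if hi - lo == 1:
--         return frags[lo]
--     mid = (lo + hi) // 2
--     return _glue(_join(frags, lo, mid), _join(frags, mid, hi))
--
--
-- def _glue(x, y):
--     if not y:
--         return x
--     if not x:
--         return y
--     a, b = x[-1], y[0]
--     if a.isascii() and b.isascii() and a.isalnum() and b.isalnum():
--         return x + " " + y
--     return x + y
-- ===== Notes on version B (the rewrite author's own statement) =====
-- stated objective: alternative
-- what changed: Replaces A's linear left fold that grows one string by a divide-and-conquer join: the stripped fragments are split in halves, each half joined recursively, and the two halves merged by an associative glue operation that inspects only the edge characters; correct because glue is associative with identity "".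
import Mathlib
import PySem

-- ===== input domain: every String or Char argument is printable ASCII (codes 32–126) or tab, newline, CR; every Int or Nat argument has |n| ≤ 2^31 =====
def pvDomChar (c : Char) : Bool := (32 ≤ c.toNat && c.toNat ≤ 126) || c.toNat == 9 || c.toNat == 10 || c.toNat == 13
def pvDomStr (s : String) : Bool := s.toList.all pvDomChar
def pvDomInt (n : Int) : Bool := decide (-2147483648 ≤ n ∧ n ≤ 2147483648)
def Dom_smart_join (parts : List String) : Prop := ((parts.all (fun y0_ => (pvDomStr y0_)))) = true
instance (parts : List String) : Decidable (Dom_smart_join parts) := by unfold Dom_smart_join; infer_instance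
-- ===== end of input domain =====

-- B replaces A's linear string-growing fold by a divide-and-conquer join of the stripped fragments with an associative glue (alternative decomposition).


-- str.isascii() on a one-character string: code point < 128 (exact; PySem has no isascii primitive)
def pvAscii (c : Char) : Bool := c.toNat < 128

-- the boundary test both Pythons perform on x[-1] and y[0]
def pvBoundary (x y : String) : Bool :=
  match PySem.Str.pyGet? x (-1), PySem.Str.pyGet? y 0 with
  | some a, some b => pvAscii a && pvAscii b && PySem.Chars.isalnum a && PySem.Chars.isalnum b
  | _, _ => false

-- ===== PORT A =====
def smart_join (parts : List String) : String :=
  parts.foldl (fun result part =>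
    let fragment := PySem.Str.strip part
    if fragment = "" then result
    else if result ≠ "" ∧ pvBoundary result fragment then result ++ " " ++ fragment
    else result ++ fragment) ""

-- ===== PORT B =====
-- _glue of Source B
def pvGlue (x y : String) : String :=
  if y = "" then x
  else if x = "" then y
  else if pvBoundary x y then x ++ " " ++ y
  else x ++ y

-- _join(frags, lo, hi) of Source B, on the sublist frags[lo:hi]; the left half frags[lo:mid]
-- has (hi-lo)//2 elements (mid = (lo+hi)//2), i.e. take (length/2) of the sublist.
def pvJoin (fs : List String) : String :=
  if h : fs.length ≤ 1 then
    match fs with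
    | [] => ""
    | f :: _ => f
  else
    pvGlue (pvJoin (fs.take (fs.length / 2))) (pvJoin (fs.drop (fs.length / 2)))
termination_by fs.length
decreasing_by
  · simp only [List.length_take]; omega
  · simp only [List.length_drop]; omega

def smart_join_alt (parts : List String) : String :=
  pvJoin (parts.map PySem.Str.strip)

-- ===== PRECONDITION & SPEC =====
def Spec_smart_join (parts : List String) (out : String) : Prop := out = smart_join_alt parts
instance (parts : List String) (out : String) : Decidable (Spec_smart_join parts out) := by unfold Spec_smart_join; infer_instance

-- ===== CLAIM (what is proved, stated in full; the proofs are below) =====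
def Claim_equal_smart_join : Prop := ∀ (parts : List String), Dom_smart_join parts → Spec_smart_join parts (smart_join parts)

-- ===== LEMMAS AND PROOFS =====

lemma pvLast_append (l m : List Char) (hm : m ≠ []) :
    PySem.List.pyGet? (l ++ m) (-1) = PySem.List.pyGet? m (-1) := by
  rw [PySem.List.pyGet?_neg_one, PySem.List.pyGet?_neg_one]
  exact List.getLast?_append_of_ne_nil _ hm

lemma pvFirst_append (l m : List Char) (hl : l ≠ []) :
    PySem.List.pyGet? (l ++ m) 0 = PySem.List.pyGet? l 0 := by
  rw [PySem.List.pyGet?_zero, PySem.List.pyGet?_zero,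
    List.getElem?_append_left (List.length_pos_iff.mpr hl)]

lemma glue_empty_left (y : String) : pvGlue "" y = y := by
  unfold pvGlue; by_cases h : y = "" <;> simp [h]

lemma glue_empty_right (x : String) : pvGlue x "" = x := by
  unfold pvGlue; simp

-- for nonempty operands, glue is a concatenation with an optional middle space
lemma glue_eq (x y : String) (hx : x ≠ "") (hy : y ≠ "") :
    pvGlue x y = x ++ (if pvBoundary x y then " " else "") ++ y := by
  unfold pvGlue
  by_cases hb : pvBoundary x y <;> simp [hx, hy, hb]

lemma glue_ne_empty (x y : String) (hx : x ≠ "") : pvGlue x y ≠ "" := by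
  have hxl : x.toList ≠ [] := fun h => hx (String.toList_eq_nil_iff.mp h)
  unfold pvGlue
  by_cases hyy : y = ""
  · simp [hyy, hx]
  · by_cases hb : pvBoundary x y <;>
      simp [hyy, hx, hb, String.ext_iff, hxl]

lemma glue_last (x y : String) (hy : y ≠ "") :
    PySem.Str.pyGet? (pvGlue x y) (-1) = PySem.Str.pyGet? y (-1) := by
  have hyl : y.toList ≠ [] := fun h => hy (String.toList_eq_nil_iff.mp h)
  unfold pvGlue
  by_cases hxx : x = ""
  · simp [hxx, hy]
  · by_cases hb : pvBoundary x y
    · simp [hy, hxx, hb]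
      rw [show x.toList ++ ' ' :: y.toList = (x.toList ++ [' ']) ++ y.toList from by simp,
        pvLast_append _ _ hyl]
    · simp [hy, hxx, hb]
      rw [pvLast_append _ _ hyl]

lemma glue_first (x y : String) (hx : x ≠ "") :
    PySem.Str.pyGet? (pvGlue x y) 0 = PySem.Str.pyGet? x 0 := by
  have hxl : x.toList ≠ [] := fun h => hx (String.toList_eq_nil_iff.mp h)
  unfold pvGlue
  by_cases hyy : y = ""
  · simp [hyy]
  · by_cases hb : pvBoundary x y
    · simp [hyy, hx, hb]
      rw [show x.toList ++ ' ' :: y.toList = x.toList ++ (' ' :: y.toList) from rfl,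
        pvFirst_append _ _ hxl]
    · simp [hyy, hx, hb]
      rw [pvFirst_append _ _ hxl]

lemma boundary_congr (x x' y y' : String)
    (h1 : PySem.Str.pyGet? x (-1) = PySem.Str.pyGet? x' (-1))
    (h2 : PySem.Str.pyGet? y 0 = PySem.Str.pyGet? y' 0) :
    pvBoundary x y = pvBoundary x' y' := by
  unfold pvBoundary; rw [h1, h2]

lemma glue_assoc (x y z : String) : pvGlue (pvGlue x y) z = pvGlue x (pvGlue y z) := by
  by_cases hy : y = ""
  · rw [hy, glue_empty_right, glue_empty_left]
  · by_cases hx : x = ""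
    · rw [hx, glue_empty_left, glue_empty_left]
    · by_cases hz : z = ""
      · rw [hz, glue_empty_right, glue_empty_right]
      · have hxy : pvGlue x y ≠ "" := glue_ne_empty x y hx
        have hyz : pvGlue y z ≠ "" := glue_ne_empty y z hy
        have b1 : pvBoundary (pvGlue x y) z = pvBoundary y z :=
          boundary_congr _ _ _ _ (glue_last x y hy) rfl
        have b2 : pvBoundary x (pvGlue y z) = pvBoundary x y :=
          boundary_congr _ _ _ _ rfl (glue_first y z hy)
        rw [glue_eq _ z hxy hz, glue_eq x _ hx hyz, b1, b2,
          glue_eq x y hx hy, glue_eq y z hy hz]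
        by_cases c1 : pvBoundary x y <;> by_cases c2 : pvBoundary y z <;>
          simp [c1, c2, String.append_assoc]

-- foldl of glue from an arbitrary seed
lemma foldl_glue_seed (l : List String) : ∀ (a : String),
    l.foldl pvGlue a = pvGlue a (l.foldl pvGlue "") := by
  induction l with
  | nil => intro a; simp [List.foldl, glue_empty_right]
  | cons x t ih =>
    intro a
    simp only [List.foldl_cons]
    rw [ih (pvGlue a x), ih (pvGlue "" x), glue_empty_left, glue_assoc]

lemma foldl_glue_append (l1 l2 : List String) :
    (l1 ++ l2).foldl pvGlue "" = pvGlue (l1.foldl pvGlue "") (l2.foldl pvGlue "") := by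
  rw [List.foldl_append, foldl_glue_seed]

-- B's divide-and-conquer computes the left fold of glue
lemma pvJoin_eq_foldl (fs : List String) : pvJoin fs = fs.foldl pvGlue "" := by
  by_cases h : fs.length ≤ 1
  · unfold pvJoin
    simp only [h, dif_pos]
    match fs with
    | [] => rfl
    | [f] => simp [List.foldl, glue_empty_left]
    | _ :: _ :: _ => simp at h
  · unfold pvJoin
    simp only [h, dif_neg, not_false_iff]
    rw [pvJoin_eq_foldl (fs.take (fs.length / 2)),
        pvJoin_eq_foldl (fs.drop (fs.length / 2)),
        ← foldl_glue_append, List.take_append_drop]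
termination_by fs.length
decreasing_by
  · simp only [List.length_take]; omega
  · simp only [List.length_drop]; omega

-- A's per-part step is glue with the stripped fragment
lemma step_eq_glue (r p : String) :
    (let fragment := PySem.Str.strip p
     if fragment = "" then r
     else if r ≠ "" ∧ pvBoundary r fragment then r ++ " " ++ fragment
     else r ++ fragment) = pvGlue r (PySem.Str.strip p) := by
  simp only []
  set f := PySem.Str.strip p
  unfold pvGlue
  by_cases hf : f = ""
  · simp [hf]
  · by_cases hr : r = ""
    · simp [hf, hr]
    · by_cases hb : pvBoundary r f <;> simp [hf, hr, hb]

-- ===== VERDICT (by name: the statement is the Claim_ definition above) =====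
theorem smart_join_spec : Claim_equal_smart_join := by
  intro parts _
  unfold Spec_smart_join smart_join smart_join_alt
  rw [pvJoin_eq_foldl, List.foldl_map]
  congr 1
  funext r p
  exact step_eq_glue r p
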